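-- pv_equiv track=rewrite | github.com/tom-naccarato/Advent-of-Code-2025 | Day2/part1.py | sum_invalid_ids_in_range
-- ===== SOURCE A (Python) =====
-- def sum_invalid_ids_in_range(start_id:int, end_id:int):
--     invalid_sum = 0
--     for id in range(start_id, end_id + 1):
--         # Convert id to string
--         id_str = str(id)
--         if len(id_str) % 2 != 0:
--             continue  # Skip IDs with odd number of digits as cannot be invalid
--         # Split id into two halves
--         mid = len(id_str) // 2
--         first_half = id_str[:mid]
--         second_half = id_str[mid:]
--         # Check if first and second halves are the same - if so, index is invalid
--         if first_half == second_half: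
--             invalid_sum += id # Add invalid ID to sum
--     return invalid_sum # Return the sum of invalid IDs in the range
-- ===== SOURCE B (Python) =====
-- def sum_invalid_ids_in_range(start_id: int, end_id: int):
--     # Closed form: invalid IDs are exactly x*(10**d + 1) for x with d digits
--     # (the ID's decimal string is str(x) twice). Per half-length d, sum the
--     # arithmetic series of valid x intersecting [start_id, end_id].
--     total = 0
--     d = 1
--     while 10 ** (2 * d - 1) <= end_id:
--         m = 10 ** d + 1
--         lo = max(10 ** (d - 1), -(-start_id // m))  # ceil(start_id / m)
--         hi = min(10 ** d - 1, end_id // m)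
--         if lo <= hi:
--             total += m * (lo + hi) * (hi - lo + 1) // 2
--         d += 1
--     return total
-- ===== Notes on version B (the rewrite author's own statement) =====
-- stated objective: faster
-- what changed: A scans every id in [start_id, end_id] and string-tests each; B uses the closed form that invalid ids are exactly x*(10^d+1) for x with d digits, summing one arithmetic series per half-length d.
import Mathlib
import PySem

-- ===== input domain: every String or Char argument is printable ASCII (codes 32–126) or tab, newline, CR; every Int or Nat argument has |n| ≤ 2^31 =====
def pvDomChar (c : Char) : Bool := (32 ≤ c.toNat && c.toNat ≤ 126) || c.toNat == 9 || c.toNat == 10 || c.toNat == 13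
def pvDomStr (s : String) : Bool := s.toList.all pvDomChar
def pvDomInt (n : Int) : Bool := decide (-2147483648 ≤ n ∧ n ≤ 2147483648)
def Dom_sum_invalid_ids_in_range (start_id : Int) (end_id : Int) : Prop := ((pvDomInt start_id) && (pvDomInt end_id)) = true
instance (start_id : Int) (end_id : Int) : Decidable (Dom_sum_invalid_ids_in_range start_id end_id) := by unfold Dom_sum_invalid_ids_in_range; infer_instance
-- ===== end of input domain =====

-- B replaces A's per-id scan of [start_id, end_id] by a closed form: the "invalid" IDs are exactly
-- x*(10^d+1) for x with d digits, so per half-length d an arithmetic series over the valid x is summed.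

-- ===== PORT A =====
def sum_invalid_ids_in_range (start_id : Int) (end_id : Int) : Int :=
  (PySem.List.pyRange start_id (end_id + 1)).foldl (fun invalid_sum id =>
    let id_str := PySem.Int.toStr id
    if PySem.Int.mod (PySem.Str.len id_str) 2 ≠ 0 then invalid_sum
    else
      let mid := PySem.Int.floordiv (PySem.Str.len id_str) 2
      let first_half := PySem.Str.slice id_str none (some mid)
      let second_half := PySem.Str.slice id_str (some mid) none
      if first_half = second_half then invalid_sum + id else invalid_sum) 0

-- ===== PORT B =====
-- termination bound for B's while-loop (the loop guard forces d < end_id)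
lemma pvAltGo_bound (d : Nat) : (d : Int) < 10 ^ (2 * d - 1) := by
  cases d with
  | zero => norm_num
  | succ k =>
    have h1 : (k + 1 : Nat) < 10 ^ (k + 1) := Nat.lt_pow_self (by norm_num)
    have h2 : (10 : Nat) ^ (k + 1) ≤ 10 ^ (2 * (k + 1) - 1) := Nat.pow_le_pow_right (by norm_num) (by omega)
    exact_mod_cast lt_of_lt_of_le h1 h2

def pvAltGo (start_id end_id total : Int) (d : Nat) : Int :=
  if (10 : Int) ^ (2 * d - 1) ≤ end_id then
    let m : Int := 10 ^ d + 1
    let lo : Int := max ((10 : Int) ^ (d - 1)) (-(PySem.Int.floordiv (-start_id) m))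
    let hi : Int := min ((10 : Int) ^ d - 1) (PySem.Int.floordiv end_id m)
    pvAltGo start_id end_id
      (if lo ≤ hi then total + PySem.Int.floordiv (m * (lo + hi) * (hi - lo + 1)) 2 else total) (d + 1)
  else total
termination_by (end_id.toNat + 1) - d
decreasing_by
  rename_i h
  have h2 : (d : Int) < end_id := lt_of_lt_of_le (pvAltGo_bound d) h
  omega

def sum_invalid_ids_in_range_alt (start_id : Int) (end_id : Int) : Int :=
  pvAltGo start_id end_id 0 1

-- ===== PRECONDITION & SPEC =====
def Spec_sum_invalid_ids_in_range (start_id : Int) (end_id : Int) (out : Int) : Prop := out = sum_invalid_ids_in_range_alt start_id end_id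
instance (start_id : Int) (end_id : Int) (out : Int) : Decidable (Spec_sum_invalid_ids_in_range start_id end_id out) := by unfold Spec_sum_invalid_ids_in_range; infer_instance

-- ===== CLAIM (what is proved, stated in full; the proofs are below) =====
def Claim_equal_sum_invalid_ids_in_range : Prop := ∀ (start_id : Int) (end_id : Int), Dom_sum_invalid_ids_in_range start_id end_id → Spec_sum_invalid_ids_in_range start_id end_id (sum_invalid_ids_in_range start_id end_id)

-- ===== LEMMAS AND PROOFS =====

-- `hDb n d` decides "n is x·(10^d+1) for some x with exactly d digits" arithmetically
def hDb (n : Int) (d : Nat) : Bool :=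
  decide (n % ((10:Int)^d + 1) = 0 ∧ (10:Int)^(d-1) ≤ n / ((10:Int)^d + 1) ∧ n / ((10:Int)^d + 1) ≤ (10:Int)^d - 1)

lemma hDb_iff (n : Int) (d : Nat) :
    hDb n d = true ↔ ∃ x : Int, (10:Int)^(d-1) ≤ x ∧ x ≤ 10^d - 1 ∧ n = x * (10^d + 1) := by
  have hm : ((10:Int)^d + 1) ≠ 0 := by positivity
  simp only [hDb, decide_eq_true_eq]
  constructor
  · rintro ⟨h1, h2, h3⟩
    exact ⟨n / (10^d+1), h2, h3, by rw [Int.ediv_mul_cancel (Int.dvd_of_emod_eq_zero h1)]⟩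
  · rintro ⟨x, h1, h2, rfl⟩
    rw [Int.mul_ediv_cancel _ hm]
    exact ⟨Int.mul_emod_left _ _, h1, h2⟩

def anyD (n : Int) : Bool := hDb n 1 || hDb n 2 || hDb n 3 || hDb n 4 || hDb n 5

noncomputable def pvTerm (s e : Int) (d : Nat) : Int :=
  ∑ n ∈ Finset.Icc s e, (if hDb n d then n else 0)

-- ---- digit-string characterization ----

lemma toDigitsCore_eq (f : Nat) : ∀ (n : Nat) (acc : List Char), n < f → 0 < n →
    Nat.toDigitsCore 10 f n acc = ((Nat.digits 10 n).map Nat.digitChar).reverse ++ acc := by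
  induction f with
  | zero => intro n acc h; omega
  | succ f ih =>
    intro n acc hnf hn
    rw [Nat.digits_def' (by norm_num : 1 < 10) hn]
    simp only [Nat.toDigitsCore, List.map_cons, List.reverse_cons]
    by_cases h0 : n / 10 = 0
    · have : Nat.digits 10 (n / 10) = [] := by rw [h0]; simp
      simp [this]
      intro hge; omega
    · rw [if_neg h0, ih (n / 10) _ (by omega) (Nat.pos_of_ne_zero h0)]
      simp [List.append_assoc]

lemma toChars_pos (n : Int) (h : 0 < n) :
    PySem.Int.toChars n = ((Nat.digits 10 n.toNat).map Nat.digitChar).reverse := by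
  have hn : ¬ n < 0 := by omega
  have ht : 0 < n.toNat := by omega
  simp only [PySem.Int.toChars, if_neg hn, Nat.toDigits]
  simpa using toDigitsCore_eq (n.toNat + 1) n.toNat [] (by omega) ht

lemma map_digitChar_inj : ∀ (l1 l2 : List Nat), (∀ x ∈ l1, x < 10) → (∀ x ∈ l2, x < 10) →
    l1.map Nat.digitChar = l2.map Nat.digitChar → l1 = l2 := by
  have key : ∀ a < 10, ∀ b < 10, Nat.digitChar a = Nat.digitChar b → a = b := by decide
  intro l1
  induction l1 with
  | nil => intro l2 _ _ h; cases l2 <;> simp_all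
  | cons a t ih =>
    intro l2 h1 h2 h
    cases l2 with
    | nil => simp at h
    | cons b t2 =>
      simp only [List.map_cons, List.cons.injEq] at h
      have := key a (h1 a (by simp)) b (h2 b (by simp)) h.1
      subst this
      rw [ih t2 (fun x hx => h1 x (by simp [hx])) (fun x hx => h2 x (by simp [hx])) h.2]

-- the exact condition A's loop body tests, on the character list of str(n)
def charCond (n : Int) : Prop :=
  (PySem.Int.toChars n).length % 2 = 0 ∧
    (PySem.Int.toChars n).take ((PySem.Int.toChars n).length / 2) =
      (PySem.Int.toChars n).drop ((PySem.Int.toChars n).length / 2)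

lemma digits_double (xn d : Nat) (hge : 10 ^ (d-1) ≤ xn) (hlt : xn < 10 ^ d) (hd : 1 ≤ d) :
    Nat.digits 10 (xn + 10 ^ d * xn) = Nat.digits 10 xn ++ Nat.digits 10 xn := by
  have h10 : (1:Nat) < 10 := by norm_num
  have hxne : xn ≠ 0 := by
    have hp : 0 < 10 ^ (d-1) := by positivity
    omega
  set E := Nat.digits 10 xn with hE
  have hElen : E.length = d := by
    have h1 : E.length ≤ d := (Nat.digits_length_le_iff h10 xn).mpr hlt
    have h2 : d - 1 < E.length := (Nat.lt_digits_length_iff h10 xn).mpr hge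
    omega
  have hElt : ∀ x ∈ E, x < 10 := fun x hx => Nat.digits_lt_base h10 hx
  have hEne : E ≠ [] := Nat.digits_ne_nil_iff_ne_zero.mpr hxne
  have hofs : Nat.ofDigits 10 (E ++ E) = xn + 10 ^ d * xn := by
    rw [Nat.ofDigits_append, hElen, hE]
    simp [Nat.ofDigits_digits]
  rw [← hofs]
  apply Nat.digits_ofDigits 10 h10
  · intro x hx; rcases List.mem_append.mp hx with h | h <;> exact hElt x h
  · intro h
    rw [List.getLast_append]
    have hne' : ¬ (E.isEmpty = true) := by simp [hEne]
    rw [dif_neg hne']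
    exact Nat.getLast_digit_ne_zero 10 hxne

lemma charCond_pos_iff (n : Int) (hn : 0 < n) :
    charCond n ↔ ∃ d : Nat, 1 ≤ d ∧ hDb n d = true := by
  have h10 : (1:Nat) < 10 := by norm_num
  have htn : n.toNat ≠ 0 := by omega
  set D := Nat.digits 10 n.toNat with hDdef
  have hDne : D ≠ [] := Nat.digits_ne_nil_iff_ne_zero.mpr htn
  have hlt : ∀ x ∈ D, x < 10 := fun x hx => Nat.digits_lt_base h10 hx
  have hL : PySem.Int.toChars n = (D.map Nat.digitChar).reverse := toChars_pos n hn
  have hlen : (PySem.Int.toChars n).length = D.length := by simp [hL]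
  constructor
  · rintro ⟨heven, hhalf⟩
    rw [hlen] at heven hhalf
    obtain ⟨d, hd2⟩ : ∃ d, D.length = 2 * d := ⟨D.length / 2, by omega⟩
    have hd1 : 1 ≤ d := by
      rcases Nat.eq_zero_or_pos d with h | h
      · exfalso; apply hDne; rw [← List.length_eq_zero_iff]; omega
      · exact h
    have hdd : D.length / 2 = d := by omega
    rw [hdd] at hhalf
    have e1 : (PySem.Int.toChars n).take d = ((D.drop d).map Nat.digitChar).reverse := by
      have hx : D.length - d = d := by omega
      rw [hL, List.take_reverse, List.length_map, ← List.map_drop, hx]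
    have e2 : (PySem.Int.toChars n).drop d = ((D.take d).map Nat.digitChar).reverse := by
      have hx : D.length - d = d := by omega
      rw [hL, List.drop_reverse, List.length_map, ← List.map_take, hx]
    have hmap : D.drop d = D.take d := by
      apply map_digitChar_inj _ _ (fun x hx => hlt x (List.mem_of_mem_drop hx))
        (fun x hx => hlt x (List.mem_of_mem_take hx))
      have := hhalf
      rw [e1, e2] at this
      exact List.reverse_injective this
    set E := D.drop d with hEdef
    have hDE : D = E ++ E := by
      conv_lhs => rw [← List.take_append_drop d D]
      rw [← hmap]
    have hElen : E.length = d := by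
      rw [hEdef, List.length_drop]; omega
    have hEne : E ≠ [] := by
      intro h; apply hDne
      rw [hDE, h]; rfl
    have hElast : ∀ (h : E ≠ []), E.getLast h ≠ 0 := by
      intro h
      show (D.drop d).getLast h ≠ 0
      rw [List.getLast_drop]
      exact Nat.getLast_digit_ne_zero 10 htn
    have hElt : ∀ x ∈ E, x < 10 := fun x hx => hlt x (List.mem_of_mem_drop hx)
    set x := Nat.ofDigits 10 E with hxdef
    have hdigx : Nat.digits 10 x = E := Nat.digits_ofDigits 10 h10 E hElt hElast
    have hxlt : x < 10 ^ d := by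
      rw [← hElen]; exact Nat.ofDigits_lt_base_pow_length h10 hElt
    have hxge : 10 ^ (d - 1) ≤ x := by
      rw [← Nat.lt_digits_length_iff h10, hdigx, hElen]; omega
    have hnval : n.toNat = x + 10 ^ d * x := by
      conv_lhs => rw [← Nat.ofDigits_digits 10 n.toNat, ← hDdef, hDE]
      rw [Nat.ofDigits_append, hElen]
    refine ⟨d, hd1, (hDb_iff n d).mpr ⟨(x : Int), ?_, ?_, ?_⟩⟩
    · exact_mod_cast hxge
    · have : (x:Int) < (10:Int) ^ d := by exact_mod_cast hxlt
      omega
    · have hcast : n = (n.toNat : Int) := by omega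
      rw [hcast, hnval]; push_cast; ring
  · rintro ⟨d, hd1, hd⟩
    rw [hDb_iff] at hd
    obtain ⟨x, hxge, hxle, hnx⟩ := hd
    have hxpos : 0 < x := lt_of_lt_of_le (by positivity) hxge
    set xn := x.toNat with hxndef
    have hx : x = (xn : Int) := by omega
    have hxnge : 10 ^ (d-1) ≤ xn := by rw [hx] at hxge; exact_mod_cast hxge
    have hxnlt : xn < 10 ^ d := by
      rw [hx] at hxle
      have : ((xn:Int)) < (10:Int)^d := by omega
      exact_mod_cast this
    have hntn : n.toNat = xn + 10 ^ d * xn := by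
      have : n = ((xn + 10 ^ d * xn : Nat) : Int) := by rw [hnx, hx]; push_cast; ring
      omega
    have hdig : D = Nat.digits 10 xn ++ Nat.digits 10 xn := by
      rw [hDdef, hntn]; exact digits_double xn d hxnge hxnlt hd1
    set E := Nat.digits 10 xn with hE
    have hElen : E.length = d := by
      have h1 : E.length ≤ d := (Nat.digits_length_le_iff h10 xn).mpr hxnlt
      have h2 : d - 1 < E.length := (Nat.lt_digits_length_iff h10 xn).mpr hxnge
      omega
    have hDlen : D.length = 2 * d := by rw [hdig, List.length_append, hElen]; omega
    constructor
    · rw [hlen, hDlen]; omega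
    · rw [hlen, hDlen]
      have hdd : 2 * d / 2 = d := by omega
      have hlen2 : (E ++ E).length = 2 * d := by rw [List.length_append, hElen]; omega
      have hsub : (E ++ E).length - d = d := by omega
      rw [hdd, hL, hdig, List.take_reverse, List.drop_reverse, List.length_map, hsub,
        ← List.map_drop, ← List.map_take]
      have hdropE : (E ++ E).drop d = E := by
        conv_lhs => rw [← hElen]
        exact List.drop_left
      have htakeE : (E ++ E).take d = E := by
        conv_lhs => rw [← hElen]
        exact List.take_left
      rw [hdropE, htakeE]

lemma toDigits_ne_dash {m : Nat} (hm : 0 < m) : ∀ c ∈ Nat.toDigits 10 m, c ≠ '-' := by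
  have key : ∀ a < 10, Nat.digitChar a ≠ '-' := by decide
  intro c hc
  rw [show Nat.toDigits 10 m = ((Nat.digits 10 m).map Nat.digitChar).reverse from by
    simpa [Nat.toDigits] using toDigitsCore_eq (m+1) m [] (by omega) hm] at hc
  rw [List.mem_reverse, List.mem_map] at hc
  obtain ⟨a, ha, rfl⟩ := hc
  exact key a (Nat.digits_lt_base (by norm_num) ha)

lemma hDb_pos {n : Int} {d : Nat} (h : hDb n d = true) : 0 < n := by
  rw [hDb_iff] at h
  obtain ⟨x, h1, _, rfl⟩ := h
  have hx : 0 < x := lt_of_lt_of_le (by positivity) h1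
  positivity

lemma charCond_iff (n : Int) : charCond n ↔ ∃ d : Nat, 1 ≤ d ∧ hDb n d = true := by
  rcases lt_trichotomy n 0 with hneg | rfl | hpos
  · constructor
    · rintro ⟨heven, hhalf⟩
      exfalso
      have hL : PySem.Int.toChars n = '-' :: Nat.toDigits 10 n.natAbs := by
        simp [PySem.Int.toChars, hneg]
      set t := Nat.toDigits 10 n.natAbs with ht
      rw [hL] at heven hhalf
      simp only [List.length_cons] at heven hhalf
      obtain ⟨d, hd2⟩ : ∃ d, t.length + 1 = 2 * d := ⟨(t.length + 1) / 2, by omega⟩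
      have hd1 : 1 ≤ d := by omega
      have hdd : (t.length + 1) / 2 = d := by omega
      rw [hdd] at hhalf
      obtain ⟨d', rfl⟩ : ∃ d', d = d' + 1 := ⟨d - 1, by omega⟩
      rw [List.take_succ_cons, List.drop_succ_cons] at hhalf
      have hne : t.drop d' ≠ [] := by
        intro hnil
        have := congrArg List.length hnil
        rw [List.length_drop] at this
        simp at this
        omega
      have hhead : '-' ∈ t.drop d' := by
        rw [← hhalf]
        simp
      exact toDigits_ne_dash (by omega) '-' (List.mem_of_mem_drop hhead) rfl
    · rintro ⟨d, hd1, hd⟩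
      exact absurd (hDb_pos hd) (by omega)
  · constructor
    · rintro ⟨heven, _⟩
      exfalso
      have h0 : PySem.Int.toChars 0 = ['0'] := rfl
      rw [h0] at heven
      simp at heven
    · rintro ⟨d, hd1, hd⟩
      exact absurd (hDb_pos hd) (by omega)
  · exact charCond_pos_iff n hpos

lemma hDb_bounds {n : Int} {d : Nat} (hd : 1 ≤ d) (h : hDb n d = true) :
    (10:Int)^(2*d-1) < n ∧ n < 10^(2*d) := by
  rw [hDb_iff] at h
  obtain ⟨x, h1, h2, rfl⟩ := h
  have e1 : (10:Int)^(d-1) * (10:Int)^d = 10^(2*d-1) := by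
    rw [← pow_add]; congr 1; omega
  have e2 : (10:Int)^d * (10:Int)^d = 10^(2*d) := by
    rw [← pow_add]; congr 1; omega
  have hp1 : (0:Int) < 10^(d-1) := by positivity
  have hm : (0:Int) < 10^d + 1 := by positivity
  constructor
  · have hlow : (10:Int)^(d-1) * (10^d + 1) ≤ x * (10^d + 1) :=
      mul_le_mul_of_nonneg_right h1 (by positivity)
    nlinarith
  · have hhigh : x * (10^d + 1) ≤ ((10:Int)^d - 1) * (10^d + 1) :=
      mul_le_mul_of_nonneg_right h2 (by positivity)
    nlinarith

lemma hDb_unique {n : Int} {d d' : Nat} (hd : 1 ≤ d) (hd' : 1 ≤ d')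
    (h : hDb n d = true) (h' : hDb n d' = true) : d = d' := by
  have key : ∀ {a b : Nat}, 1 ≤ a → 1 ≤ b → a < b →
      hDb n a = true → hDb n b = true → False := by
    intro a b ha hb hab hA hB
    have b1 := (hDb_bounds ha hA).2
    have b2 := (hDb_bounds hb hB).1
    have hle : (10:Int)^(2*a) ≤ 10^(2*b-1) :=
      pow_le_pow_right₀ (by norm_num) (by omega)
    omega
  rcases lt_trichotomy d d' with hlt | heq | hgt
  · exact absurd (key hd hd' hlt h h') (by simp)
  · exact heq
  · exact absurd (key hd' hd hgt h' h) (by simp)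

lemma anyD_iff (n : Int) (hn : n ≤ 2147483648) :
    anyD n = true ↔ ∃ d : Nat, 1 ≤ d ∧ hDb n d = true := by
  constructor
  · intro h
    simp only [anyD, Bool.or_eq_true] at h
    rcases h with ((((h | h) | h) | h) | h)
    exacts [⟨1, by omega, h⟩, ⟨2, by omega, h⟩, ⟨3, by omega, h⟩, ⟨4, by omega, h⟩, ⟨5, by omega, h⟩]
  · rintro ⟨d, hd1, hd⟩
    have hd5 : d ≤ 5 := by
      by_contra hgt
      have hb := (hDb_bounds hd1 hd).1
      have hle : (10:Int)^11 ≤ 10^(2*d-1) :=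
        pow_le_pow_right₀ (by norm_num) (by omega)
      norm_num at hle
      omega
    interval_cases d <;> simp [anyD, hd]

-- ---- A-side: the loop body adds (if anyD n then n else 0) ----

lemma bodyA_eq (acc n : Int) (hn : n ≤ 2147483648) :
    (let id_str := PySem.Int.toStr n
     if PySem.Int.mod (PySem.Str.len id_str) 2 ≠ 0 then acc
     else
       let mid := PySem.Int.floordiv (PySem.Str.len id_str) 2
       let first_half := PySem.Str.slice id_str none (some mid)
       let second_half := PySem.Str.slice id_str (some mid) none
       if first_half = second_half then acc + n else acc) =
    acc + (if anyD n then n else 0) := by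
  have hlen : PySem.Str.len (PySem.Int.toStr n) = ((PySem.Int.toChars n).length : Int) := by
    rw [PySem.Str.len_eq, PySem.Int.toList_toStr]
  set L := PySem.Int.toChars n with hLdef
  have hmod : PySem.Int.mod ((L.length : Int)) 2 = ((L.length % 2 : Nat) : Int) := by
    exact_mod_cast PySem.Int.mod_natCast L.length 2
  have hdiv : PySem.Int.floordiv ((L.length : Int)) 2 = ((L.length / 2 : Nat) : Int) := by
    exact_mod_cast PySem.Int.floordiv_natCast L.length 2
  have hslice : (PySem.Str.slice (PySem.Int.toStr n) none (some ((L.length / 2 : Nat) : Int)) =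
      PySem.Str.slice (PySem.Int.toStr n) (some ((L.length / 2 : Nat) : Int)) none) ↔
      (L.take (L.length / 2) = L.drop (L.length / 2)) := by
    rw [String.ext_iff, PySem.Str.toList_slice, PySem.Str.toList_slice,
      PySem.Chars.slice_eq_listSlice, PySem.Chars.slice_eq_listSlice, PySem.Int.toList_toStr,
      PySem.List.slice_to_natCast, PySem.List.slice_from_natCast]
  have hcond : anyD n = true ↔ charCond n := by
    rw [charCond_iff n, anyD_iff n hn]
  simp only [hlen, hmod, hdiv]
  by_cases h1 : L.length % 2 = 0
  · rw [if_neg (show ¬ (((L.length % 2 : Nat) : Int) ≠ 0) from by push_cast; omega)]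
    by_cases h2 : L.take (L.length / 2) = L.drop (L.length / 2)
    · rw [if_pos (hslice.mpr h2), if_pos (hcond.mpr ⟨h1, h2⟩)]
    · rw [if_neg (fun hc => h2 (hslice.mp hc)),
        if_neg (fun hc => h2 (hcond.mp hc).2), add_zero]
  · rw [if_pos (show (((L.length % 2 : Nat) : Int) ≠ 0) from by push_cast; omega),
      if_neg (fun hc => h1 (hcond.mp hc).1), add_zero]

lemma list_range_map_sum (g : Nat → Int) (N : Nat) :
    ((List.range N).map g).sum = ∑ k ∈ Finset.range N, g k := by
  induction N with
  | zero => simp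
  | succ N ih => rw [Finset.sum_range_succ, List.range_succ]; simp [ih]

lemma range_sum_shift (f : Int → Int) (N : Nat) (a : Int) :
    ∑ k ∈ Finset.range N, f (a + k) = ∑ n ∈ Finset.Icc a (a + N - 1), f n := by
  induction N with
  | zero =>
    rw [Finset.range_zero, Finset.sum_empty, Finset.Icc_eq_empty (by omega), Finset.sum_empty]
  | succ N ih =>
    have hcast : a + ((N:Int) + 1) - 1 = (a + N - 1) + 1 := by ring
    rw [Finset.sum_range_succ, ih]
    push_cast
    rw [hcast, ← Finset.insert_Icc_right_eq_Icc_add_one (by omega),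
      Finset.sum_insert (by rw [Finset.mem_Icc]; omega)]
    have : a + N - 1 + 1 = a + N := by ring
    rw [this, add_comm]

lemma pyRange_map_sum (f : Int → Int) (a b : Int) :
    ((PySem.List.pyRange a (b + 1)).map f).sum = ∑ n ∈ Finset.Icc a b, f n := by
  rw [PySem.List.pyRange_one, List.map_map, list_range_map_sum]
  simp only [Function.comp_apply]
  rw [range_sum_shift]
  by_cases h : a ≤ b + 1
  · have : a + ((b + 1 - a).toNat : Int) - 1 = b := by omega
    rw [this]
  · have h0 : (b + 1 - a).toNat = 0 := by omega
    rw [h0]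
    rw [Finset.Icc_eq_empty (by omega), Finset.Icc_eq_empty (by omega)]

lemma A_eq_sum (s e : Int) (he : e ≤ 2147483648) :
    sum_invalid_ids_in_range s e = ∑ n ∈ Finset.Icc s e, (if anyD n then n else 0) := by
  rw [sum_invalid_ids_in_range,
    PySem.List.foldl_congr_mem _ _ (fun acc x => acc + (if anyD x then x else 0)) 0
      (fun acc x hx => bodyA_eq acc x (by
        have := (PySem.List.mem_pyRange_one.mp hx).2
        omega)),
    PySem.List.foldl_add, zero_add, pyRange_map_sum]

lemma ite_anyD_split (n : Int) (hn : n ≤ 2147483648) :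
    (if anyD n then n else 0) = ∑ d ∈ Finset.range 5, (if hDb n (d+1) then n else 0) := by
  by_cases h : anyD n = true
  · obtain ⟨d0, hd01, hd0⟩ := (anyD_iff n hn).mp h
    have hd05 : d0 ≤ 5 := by
      by_contra hgt
      have hb := (hDb_bounds hd01 hd0).1
      have hle : (10:Int)^11 ≤ 10^(2*d0-1) := pow_le_pow_right₀ (by norm_num) (by omega)
      norm_num at hle
      omega
    rw [if_pos h, Finset.sum_eq_single (d0 - 1)]
    · rw [show d0 - 1 + 1 = d0 from by omega, if_pos hd0]
    · intro b _ hb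
      rw [if_neg]
      intro hB
      exact hb (by have := hDb_unique (by omega) hd01 hB hd0; omega)
    · intro habs
      exact absurd (Finset.mem_range.mpr (by omega)) habs
  · rw [if_neg h, Finset.sum_eq_zero]
    intro d hd
    rw [if_neg]
    intro hB
    apply h
    apply (anyD_iff n hn).mpr ⟨d + 1, by omega, hB⟩

lemma A_eq_terms (s e : Int) (he : e ≤ 2147483648) :
    sum_invalid_ids_in_range s e = ∑ d ∈ Finset.range 5, pvTerm s e (d+1) := by
  rw [A_eq_sum s e he]
  rw [Finset.sum_congr rfl (fun n hn => ite_anyD_split n (by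
    have := (Finset.mem_Icc.mp hn).2
    omega))]
  rw [Finset.sum_comm]
  rfl

-- ---- B-side ----

lemma gauss (lo hi : Int) (h : lo ≤ hi) :
    (lo + hi) * (hi - lo + 1) = 2 * ∑ x ∈ Finset.Icc lo hi, x := by
  induction hi, h using Int.le_induction with
  | base => rw [Finset.Icc_self, Finset.sum_singleton]; ring
  | succ n hmn ih =>
    rw [← Finset.insert_Icc_right_eq_Icc_add_one (by omega),
      Finset.sum_insert (by rw [Finset.mem_Icc]; omega)]
    linear_combination ih

lemma term_closed (s e : Int) (d : Nat) (_hd : 1 ≤ d) :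
    pvTerm s e d = ((10:Int)^d + 1) *
      ∑ x ∈ Finset.Icc (max ((10:Int)^(d-1)) (-(PySem.Int.floordiv (-s) ((10:Int)^d + 1))))
                       (min ((10:Int)^d - 1) (PySem.Int.floordiv e ((10:Int)^d + 1))), x := by
  have hm : (0:Int) < 10^d + 1 := by positivity
  rw [pvTerm, ← Finset.sum_filter]
  have himg : (Finset.Icc s e).filter (fun n => hDb n d = true) =
      (Finset.Icc (max ((10:Int)^(d-1)) (-(PySem.Int.floordiv (-s) ((10:Int)^d + 1))))
                  (min ((10:Int)^d - 1) (PySem.Int.floordiv e ((10:Int)^d + 1)))).image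
        (fun x => x * ((10:Int)^d + 1)) := by
    ext n
    simp only [Finset.mem_filter, Finset.mem_image, Finset.mem_Icc, hDb_iff]
    constructor
    · rintro ⟨⟨hs, he'⟩, x, h1, h2, rfl⟩
      refine ⟨x, ⟨max_le_iff.mpr ⟨h1, ?_⟩, le_min_iff.mpr ⟨h2, ?_⟩⟩, rfl⟩
      · apply neg_le.mpr
        apply (PySem.Int.le_floordiv_iff_mul_le hm).mpr
        rw [neg_mul]
        omega
      · exact (PySem.Int.le_floordiv_iff_mul_le hm).mpr he'
    · rintro ⟨x, ⟨hlo, hhi⟩, rfl⟩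
      obtain ⟨h1, h2⟩ := max_le_iff.mp hlo
      obtain ⟨h3, h4⟩ := le_min_iff.mp hhi
      have hs : -x * ((10:Int)^d + 1) ≤ -s := (PySem.Int.le_floordiv_iff_mul_le hm).mp (neg_le.mp h2)
      rw [neg_mul] at hs
      have he' : x * ((10:Int)^d + 1) ≤ e := (PySem.Int.le_floordiv_iff_mul_le hm).mp h4
      exact ⟨⟨by omega, he'⟩, x, h1, h3, rfl⟩
  rw [himg, Finset.sum_image (by
    intro x _ y _ hxy
    exact mul_right_cancel₀ (by positivity) hxy)]
  rw [← Finset.sum_mul, mul_comm]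

lemma term_zero (s e : Int) (d d' : Nat) (hd' : 1 ≤ d') (hdd : d ≤ d')
    (hg : ¬ (10:Int)^(2*d-1) ≤ e) : pvTerm s e d' = 0 := by
  rw [pvTerm]
  apply Finset.sum_eq_zero
  intro n hn
  rw [Finset.mem_Icc] at hn
  rw [if_neg]
  intro hB
  have hb := (hDb_bounds hd' hB).1
  have hle : (10:Int)^(2*d-1) ≤ 10^(2*d'-1) := pow_le_pow_right₀ (by norm_num) (by omega)
  omega

lemma pvAltGo_eq (s e : Int) (he : e ≤ 2147483648) :
    ∀ (k d : Nat) (t : Int), d + k = 6 → 1 ≤ d →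
      pvAltGo s e t d = t + ∑ j ∈ Finset.range k, pvTerm s e (d + j) := by
  intro k
  induction k with
  | zero =>
    intro d t hdk _
    have hd6 : d = 6 := by omega
    subst hd6
    rw [pvAltGo, if_neg (by norm_num; omega)]
    simp
  | succ k ih =>
    intro d t hdk hd
    have hsplit : ∑ j ∈ Finset.range (k+1), pvTerm s e (d + j) =
        pvTerm s e d + ∑ j ∈ Finset.range k, pvTerm s e (d + 1 + j) := by
      rw [Finset.sum_range_succ', add_zero, add_comm]
      congr 1
      apply Finset.sum_congr rfl
      intro j _
      congr 1
      omega
    rw [pvAltGo]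
    by_cases hg : (10:Int)^(2*d-1) ≤ e
    · rw [if_pos hg]
      dsimp only
      rw [ih (d+1) _ (by omega) (by omega), hsplit]
      by_cases hlh : (max ((10:Int)^(d-1)) (-(PySem.Int.floordiv (-s) ((10:Int)^d + 1)))) ≤
          (min ((10:Int)^d - 1) (PySem.Int.floordiv e ((10:Int)^d + 1)))
      · rw [if_pos hlh]
        have hfd : PySem.Int.floordiv (((10:Int)^d + 1) *
            ((max ((10:Int)^(d-1)) (-(PySem.Int.floordiv (-s) ((10:Int)^d + 1)))) +
             (min ((10:Int)^d - 1) (PySem.Int.floordiv e ((10:Int)^d + 1)))) *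
            ((min ((10:Int)^d - 1) (PySem.Int.floordiv e ((10:Int)^d + 1))) -
             (max ((10:Int)^(d-1)) (-(PySem.Int.floordiv (-s) ((10:Int)^d + 1)))) + 1)) 2 =
            pvTerm s e d := by
          rw [term_closed s e d hd, mul_assoc, gauss _ _ hlh,
            show ((10:Int)^d + 1) * (2 * ∑ x ∈ Finset.Icc _ _, x) =
              2 * (((10:Int)^d + 1) * ∑ x ∈ Finset.Icc _ _, x) from by ring,
            PySem.Int.floordiv_eq_ediv_of_pos (by norm_num),
            Int.mul_ediv_cancel_left _ (by norm_num)]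
        rw [hfd]
        ring
      · rw [if_neg hlh]
        have hz : pvTerm s e d = 0 := by
          rw [term_closed s e d hd, Finset.Icc_eq_empty (by omega), Finset.sum_empty, mul_zero]
        rw [hz]
        ring
    · rw [if_neg hg]
      rw [Finset.sum_eq_zero (fun j hj => term_zero s e d (d + j) (by omega) (by omega) hg), add_zero]

-- ===== VERDICT (by name: the statement is the Claim_ definition above) =====
theorem sum_invalid_ids_in_range_spec : Claim_equal_sum_invalid_ids_in_range := by
  intro s e hdom
  have he : e ≤ 2147483648 := by
    simp only [Dom_sum_invalid_ids_in_range, pvDomInt, Bool.and_eq_true, decide_eq_true_eq] at hdom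
    exact hdom.2.2
  show _ = _
  rw [sum_invalid_ids_in_range_alt, pvAltGo_eq s e he 5 1 0 (by omega) le_rfl, A_eq_terms s e he]
  rw [zero_add]
  exact Finset.sum_congr rfl (fun d _ => by rw [add_comm 1 d])
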